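-- pv_equiv track=rewrite | github.com/foolishzhao/leetcode | python3/1900/_1981_Minimize_the_Difference_Between_Target_and_Chosen_Elements/main.py | minimizeTheDifference2
-- ===== SOURCE A (Python) =====
-- from typing import List
--
-- def minimizeTheDifference2(mat: List[List[int]], target: int) -> int:
--     for row in mat:
--         row.sort()
--
--     st = {0}
--     for row in mat:
--         newSt = set()
--         for x in st:
--             for y in row:
--                 newSt.add(x + y)
--                 if x + y >= target:
--                     break
--         st = newSt
--
--     return min([abs(x - target) for x in st])
-- ===== SOURCE B (Python) =====
-- from typing import List
--
-- def minimizeTheDifference2(mat: List[List[int]], target: int) -> int: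
--     for row in mat:
--         row.sort()
--
--     frontier = {0}
--     for row in mat:
--         xs = sorted(frontier)
--         nxt = set()
--         c = len(xs)
--         for j, r in enumerate(row):
--             if j > 0:
--                 bound = target - row[j - 1]
--                 while c > 0 and xs[c - 1] >= bound:
--                     c -= 1
--                 if c == 0:
--                     break
--             nxt.update([x + r for x in xs[:c]])
--         frontier = nxt
--
--     return min(abs(x - target) for x in frontier)
-- ===== Notes on version B (the rewrite author's own statement) =====
-- stated objective: alternative
-- what changed: Replaces A's per-element inner scan with break (for each reachable sum, walk the sorted row until the sum reaches target) by a per-row pass that sorts the frontier once and, for each column j, bulk-adds row[j] to the prefix of frontier values kept below target - row[j-1] via a single monotone two-pointer cutoff and set.update; the final minimum is unchanged.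
import Mathlib
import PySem

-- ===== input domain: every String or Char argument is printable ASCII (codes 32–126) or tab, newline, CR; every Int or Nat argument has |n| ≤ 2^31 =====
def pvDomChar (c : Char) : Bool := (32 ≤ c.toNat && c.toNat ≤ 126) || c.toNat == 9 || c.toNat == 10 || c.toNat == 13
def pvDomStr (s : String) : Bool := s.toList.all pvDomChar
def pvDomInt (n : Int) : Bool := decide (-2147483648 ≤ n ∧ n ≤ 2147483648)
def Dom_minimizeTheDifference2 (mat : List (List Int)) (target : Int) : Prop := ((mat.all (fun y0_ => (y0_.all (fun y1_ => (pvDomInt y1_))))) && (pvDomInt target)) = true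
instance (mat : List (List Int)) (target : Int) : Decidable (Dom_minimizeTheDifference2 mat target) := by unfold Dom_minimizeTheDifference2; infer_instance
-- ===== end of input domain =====

-- B replaces A's per-reachable-sum inner scan by a sorted-frontier pass with a two-pointer
-- cutoff per column and bulk set updates (equivalence is about the RETURN value; both A and B
-- sort each row of mat in place).

-- ===== PORT A =====
-- inner 'for y in row: newSt.add(x+y); if x+y >= target: break'
def pvInner (target x : Int) : List Int → PySem.Set Int → PySem.Set Int
  | [], acc => acc
  | y :: ys, acc =>
    let acc' := PySem.Set.add acc (x + y)
    if x + y ≥ target then acc' else pvInner target x ys acc'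

-- 'newSt = set(); for x in st: …'  (iterated in the Set's list order; the returned
-- minimum does not depend on the iteration order, so the port is exact for the result)
def pvRowStep (target : Int) (row : List Int) (st : PySem.Set Int) : PySem.Set Int :=
  st.foldl (fun acc x => pvInner target x row acc) PySem.Set.empty

def minimizeTheDifference2 (mat : List (List Int)) (target : Int) : Int :=
  let mat' := mat.map (fun row => PySem.List.sorted row (fun x => x) false)
  let st := mat'.foldl (fun st row => pvRowStep target row st) (PySem.Set.ofList [0])
  -- min([...]) raises ValueError on an empty list: Pre_ excludes that; .getD 0 is never used under Pre_
  (PySem.List.min? (st.map (fun x => |x - target|)) (fun v => v)).getD 0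

-- ===== PORT B =====
-- 'while c > 0 and xs[c - 1] >= bound: c -= 1'   (xs[c-1] with 1 ≤ c ≤ len(xs) is in range:
-- recursion on c, reading index c-1 as getD; exact on that range)
def pvShrink (xs : List Int) (bound : Int) : Nat → Nat
  | 0 => 0
  | c + 1 => if xs.getD c 0 ≥ bound then pvShrink xs bound c else c + 1

-- 'for j, r in enumerate(row): …' with the early break, recursing on the remaining row
-- suffix and carrying the enumerate counter j; 'xs[:c]' with 0 ≤ c is xs.take c (exact there)
def pvColLoop (target : Int) (row xs : List Int) : List Int → Nat → PySem.Set Int → Nat → PySem.Set Int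
  | [], _, nxt, _ => nxt
  | r :: rs, j, nxt, c =>
    if j > 0 then
      let bound := target - PySem.List.pyGetD row ((j : Int) - 1) 0
      let c' := pvShrink xs bound c
      if c' = 0 then nxt
      else pvColLoop target row xs rs (j + 1) (PySem.Set.update nxt ((xs.take c').map (fun x => x + r))) c'
    else pvColLoop target row xs rs (j + 1) (PySem.Set.update nxt ((xs.take c).map (fun x => x + r))) c

-- one row of B: 'xs = sorted(frontier); nxt = set(); c = len(xs); for j, r in enumerate(row): …'
def pvLevel (target : Int) (row : List Int) (frontier : PySem.Set Int) : PySem.Set Int :=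
  let xs := PySem.List.sorted frontier (fun x => x) false
  pvColLoop target row xs row 0 PySem.Set.empty xs.length

def minimizeTheDifference2_alt (mat : List (List Int)) (target : Int) : Int :=
  let mat' := mat.map (fun row => PySem.List.sorted row (fun x => x) false)
  let fr := mat'.foldl (fun fr row => pvLevel target row fr) (PySem.Set.ofList [0])
  -- min(generator) raises ValueError on an empty frontier: Pre_ excludes that; .getD 0 is never used under Pre_
  (PySem.List.min? (fr.map (fun x => |x - target|)) (fun v => v)).getD 0

-- ===== PRECONDITION & SPEC =====
-- Pre_ excludes matrices containing an empty row: there the reachable set becomes empty and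
-- A's min([]) raises ValueError (B's min over the empty frontier raises ValueError too).
def Pre_minimizeTheDifference2 (mat : List (List Int)) (target : Int) : Prop :=
  ∀ row ∈ mat, row ≠ []
instance (mat : List (List Int)) (target : Int) : Decidable (Pre_minimizeTheDifference2 mat target) := by unfold Pre_minimizeTheDifference2; infer_instance

def pvWitness_minimizeTheDifference2 : List (List Int) × Int := ([[3, 1], [2]], 4)

def Spec_minimizeTheDifference2 (mat : List (List Int)) (target : Int) (out : Int) : Prop := out = minimizeTheDifference2_alt mat target
instance (mat : List (List Int)) (target : Int) (out : Int) : Decidable (Spec_minimizeTheDifference2 mat target out) := by unfold Spec_minimizeTheDifference2; infer_instance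

-- ===== CLAIM (what is proved, stated in full; the proofs are below) =====
def Claim_equal_minimizeTheDifference2 : Prop := ∀ (mat : List (List Int)) (target : Int), Dom_minimizeTheDifference2 mat target → Pre_minimizeTheDifference2 mat target → Spec_minimizeTheDifference2 mat target (minimizeTheDifference2 mat target)

-- ===== LEMMAS AND PROOFS =====

-- the prefix of a row that A's inner loop explores (stop after the first y with x + y ≥ target)
def pvE (target x : Int) : List Int → List Int
  | [] => []
  | y :: ys => if x + y ≥ target then [y] else y :: pvE target x ys

-- the common index-wise description of one row step: z = x + row[j] for some frontier
-- element x that stays below target on every column before j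
def pvPair (target : Int) (row : List Int) (st : List Int) (z : Int) : Prop :=
  ∃ x ∈ st, ∃ j < row.length, z = x + row.getD j 0 ∧ ∀ j' < j, x + row.getD j' 0 < target

-- ---- A side ----

theorem mem_pvInner (target x : Int) (l : List Int) (acc : PySem.Set Int) (z : Int) :
    z ∈ pvInner target x l acc ↔ z ∈ acc ∨ ∃ y ∈ pvE target x l, z = x + y := by
  induction l generalizing acc with
  | nil => simp [pvInner, pvE]
  | cons y ys ih =>
    simp only [pvInner, pvE]
    split
    · simp [PySem.Set.mem_add]
    · rw [ih]; simp [PySem.Set.mem_add]; tauto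

theorem mem_pvRowStep_aux (target : Int) (row : List Int) (xs : List Int) (acc : PySem.Set Int) (z : Int) :
    z ∈ xs.foldl (fun acc x => pvInner target x row acc) acc ↔
      z ∈ acc ∨ ∃ x ∈ xs, ∃ y ∈ pvE target x row, z = x + y := by
  induction xs generalizing acc with
  | nil => simp
  | cons x xs ih =>
    simp only [List.foldl_cons]
    rw [ih, mem_pvInner]
    simp only [List.mem_cons, exists_eq_or_imp]
    exact or_assoc

theorem mem_pvE_iff (target x : Int) (row : List Int) (y : Int) :
    y ∈ pvE target x row ↔
      ∃ j < row.length, y = row.getD j 0 ∧ ∀ j' < j, x + row.getD j' 0 < target := by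
  induction row with
  | nil => simp [pvE]
  | cons r rs ih =>
    simp only [pvE]
    split
    · rename_i hge
      constructor
      · intro hy
        simp at hy
        exact ⟨0, by simp, by simpa using hy, by omega⟩
      · rintro ⟨j, hj, hy, hlt⟩
        cases j with
        | zero => simpa using hy
        | succ k =>
          exact absurd (hlt 0 (by omega)) (by simpa using hge)
    · rename_i hlt0
      push_neg at hlt0
      constructor
      · intro hy
        rcases List.mem_cons.mp hy with rfl | hy
        · exact ⟨0, by simp, by simp, by omega⟩
        · obtain ⟨j, hj, hyv, hall⟩ := (ih).mp hy
          refine ⟨j + 1, by simpa using hj, by simpa using hyv, ?_⟩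
          intro j' hj'
          cases j' with
          | zero => simpa using hlt0
          | succ k => simpa using hall k (by omega)
      · rintro ⟨j, hj, hy, hall⟩
        cases j with
        | zero => simp at hy; simp [hy]
        | succ k =>
          refine List.mem_cons_of_mem _ (ih.mpr ⟨k, by simpa using hj, by simpa using hy, ?_⟩)
          intro j' hj'
          simpa using hall (j' + 1) (by omega)

theorem mem_pvRowStep (target : Int) (row : List Int) (st : PySem.Set Int) (z : Int) :
    z ∈ pvRowStep target row st ↔ pvPair target row st z := by
  unfold pvRowStep pvPair
  rw [mem_pvRowStep_aux]
  simp only [PySem.Set.empty, List.not_mem_nil, false_or]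
  constructor
  · rintro ⟨x, hx, y, hy, rfl⟩
    obtain ⟨j, hj, rfl, hall⟩ := (mem_pvE_iff target x row y).mp hy
    exact ⟨x, hx, j, hj, rfl, hall⟩
  · rintro ⟨x, hx, j, hj, rfl, hall⟩
    exact ⟨x, hx, row.getD j 0, (mem_pvE_iff target x row _).mpr ⟨j, hj, rfl, hall⟩, rfl⟩

-- ---- B side ----

theorem pvShrink_le (xs : List Int) (bound : Int) (c : Nat) : pvShrink xs bound c ≤ c := by
  induction c with
  | zero => simp [pvShrink]
  | succ c ih =>
    simp only [pvShrink]
    split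
    · omega
    · omega

theorem pvShrink_spec (xs : List Int) (hxs : xs.Pairwise (· ≤ ·)) (bound : Int) (c : Nat)
    (hc : c ≤ xs.length) :
    ∀ i < xs.length, (i < pvShrink xs bound c ↔ i < c ∧ xs.getD i 0 < bound) := by
  induction c with
  | zero => intro i hi; simp [pvShrink]
  | succ c ih =>
    intro i hi
    simp only [pvShrink]
    split
    · rename_i hge
      rw [ih (by omega) i hi]
      constructor
      · rintro ⟨h1, h2⟩; exact ⟨by omega, h2⟩
      · rintro ⟨h1, h2⟩
        refine ⟨?_, h2⟩
        by_contra hcon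
        have : i = c := by omega
        subst this
        omega
    · rename_i hlt
      push_neg at hlt
      constructor
      · intro h1
        refine ⟨h1, ?_⟩
        have hcb : xs.getD c 0 < bound := hlt
        rcases Nat.lt_or_ge i c with hic | hic
        · have hpc := (List.pairwise_iff_getElem.mp hxs) i c hi (by omega) hic
          rw [List.getD_eq_getElem _ _ hi]
          rw [List.getD_eq_getElem _ _ (by omega : c < xs.length)] at hcb
          exact lt_of_le_of_lt hpc hcb
        · have : i = c := by omega
          subst this; exact hcb
      · rintro ⟨h1, _⟩; exact h1

theorem mem_take_map (xs : List Int) (c : Nat) (r z : Int) :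
    z ∈ (xs.take c).map (fun x => x + r) ↔
      ∃ i < xs.length, i < c ∧ z = xs.getD i 0 + r := by
  simp only [List.mem_map, List.mem_take_iff_getElem]
  constructor
  · rintro ⟨x, ⟨i, hi, rfl⟩, rfl⟩
    have hil : i < xs.length := by omega
    exact ⟨i, hil, by omega, by rw [List.getD_eq_getElem _ _ hil]⟩
  · rintro ⟨i, hil, hic, rfl⟩
    exact ⟨xs.getD i 0, ⟨i, by omega, by rw [List.getD_eq_getElem _ _ hil]⟩, rfl⟩

theorem pvColLoop_cons_pos (target : Int) (row xs : List Int) (r : Int) (rs : List Int)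
    (j : Nat) (nxt : PySem.Set Int) (c : Nat) (hj : 0 < j) :
    pvColLoop target row xs (r :: rs) j nxt c =
      (if pvShrink xs (target - PySem.List.pyGetD row ((j : Int) - 1) 0) c = 0 then nxt
       else pvColLoop target row xs rs (j + 1)
         (PySem.Set.update nxt ((xs.take (pvShrink xs (target - PySem.List.pyGetD row ((j : Int) - 1) 0) c)).map (fun x => x + r)))
         (pvShrink xs (target - PySem.List.pyGetD row ((j : Int) - 1) 0) c)) := by
  simp only [pvColLoop]
  rw [if_pos hj]

theorem pvColLoop_cons_zero (target : Int) (row xs : List Int) (r : Int) (rs : List Int)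
    (j : Nat) (nxt : PySem.Set Int) (c : Nat) (hj : ¬ 0 < j) :
    pvColLoop target row xs (r :: rs) j nxt c =
      pvColLoop target row xs rs (j + 1) (PySem.Set.update nxt ((xs.take c).map (fun x => x + r))) c := by
  simp only [pvColLoop]
  rw [if_neg hj]

theorem mem_pvColLoop (target : Int) (row xs : List Int) (hxs : xs.Pairwise (· ≤ ·)) :
    ∀ (suf pre : List Int), row = pre ++ suf →
      ∀ (nxt : PySem.Set Int) (c : Nat), c ≤ xs.length →
        (∀ i < xs.length, (i < c ↔ ∀ j' < pre.length - 1, xs.getD i 0 + row.getD j' 0 < target)) →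
        ∀ z, z ∈ pvColLoop target row xs suf pre.length nxt c ↔
          z ∈ nxt ∨ ∃ i < xs.length, ∃ j, pre.length ≤ j ∧ j < row.length ∧
            z = xs.getD i 0 + row.getD j 0 ∧ ∀ j' < j, xs.getD i 0 + row.getD j' 0 < target := by
  intro suf
  induction suf with
  | nil =>
    intro pre hrow nxt c hc hinv z
    have hlen : row.length = pre.length := by rw [hrow]; simp
    simp only [pvColLoop]
    constructor
    · intro hz; exact Or.inl hz
    · rintro (hz | ⟨i, hi, j, hjge, hjlen, _⟩)
      · exact hz
      · omega
  | cons r rs ih =>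
    intro pre hrow nxt c hc hinv z
    have hj0 : row.getD pre.length 0 = r := by
      rw [hrow, List.getD_eq_getElem?_getD, List.getElem?_append_right (le_refl _)]
      simp
    have hjlen0 : pre.length < row.length := by rw [hrow]; simp
    have hrow' : row = (pre ++ [r]) ++ rs := by rw [hrow]; simp
    have hlen' : (pre ++ [r]).length = pre.length + 1 := by simp
    by_cases hpre : 0 < pre.length
    · -- j ≥ 1: shrink with bound target - row[j-1]
      have hcast : ((pre.length : Int) - 1) = ((pre.length - 1 : Nat) : Int) := by
        push_cast [Nat.cast_sub (by omega : 1 ≤ pre.length)]; ring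
      have hbound : PySem.List.pyGetD row ((pre.length : Int) - 1) 0 = row.getD (pre.length - 1) 0 := by
        rw [hcast, PySem.List.pyGetD_natCast]
      rw [pvColLoop_cons_pos target row xs r rs pre.length nxt c hpre]
      set bound := target - PySem.List.pyGetD row ((pre.length : Int) - 1) 0 with hbdef
      set c' := pvShrink xs bound c with hc'def
      have hc'le : c' ≤ c := pvShrink_le xs bound c
      have hkey : ∀ i < xs.length,
          (i < c' ↔ ∀ j' < pre.length, xs.getD i 0 + row.getD j' 0 < target) := by
        intro i hi
        rw [hc'def, pvShrink_spec xs hxs bound c hc i hi, hinv i hi]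
        constructor
        · rintro ⟨hall, hb⟩
          intro j' hj'
          rcases Nat.lt_or_ge j' (pre.length - 1) with h | h
          · exact hall j' h
          · have : j' = pre.length - 1 := by omega
            subst this
            rw [hbdef, hbound] at hb
            omega
        · intro hall
          refine ⟨fun j' hj' => hall j' (by omega), ?_⟩
          have := hall (pre.length - 1) (by omega)
          rw [hbdef, hbound]
          omega
      by_cases hz0 : c' = 0
      · rw [if_pos hz0]
        constructor
        · exact Or.inl
        · rintro (hz | ⟨i, hi, j, hjge, hjlen, hzv, hall⟩)
          · exact hz
          · have : i < c' := (hkey i hi).mpr (fun j' hj' => hall j' (by omega))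
            omega
      · rw [if_neg hz0]
        have hinv' : ∀ i < xs.length,
            (i < c' ↔ ∀ j' < (pre ++ [r]).length - 1, xs.getD i 0 + row.getD j' 0 < target) := by
          intro i hi
          simpa using hkey i hi
        have hih := ih (pre ++ [r]) hrow' (PySem.Set.update nxt ((xs.take c').map (fun x => x + r))) c' (by omega) hinv' z
        rw [hlen'] at hih
        rw [hih, PySem.Set.mem_update, mem_take_map]
        constructor
        · rintro ((hz | ⟨i, hi, hic, rfl⟩) | ⟨i, hi, j, hjge, hjlen, hzv, hall⟩)
          · exact Or.inl hz
          · exact Or.inr ⟨i, hi, pre.length, le_refl _, hjlen0, by rw [hj0], (hkey i hi).mp hic⟩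
          · exact Or.inr ⟨i, hi, j, by omega, hjlen, hzv, hall⟩
        · rintro (hz | ⟨i, hi, j, hjge, hjlen, hzv, hall⟩)
          · exact Or.inl (Or.inl hz)
          · rcases Nat.eq_or_lt_of_le hjge with rfl | hgt
            · exact Or.inl (Or.inr ⟨i, hi, (hkey i hi).mpr hall, by rw [← hj0]; exact hzv⟩)
            · exact Or.inr ⟨i, hi, j, by omega, hjlen, hzv, hall⟩
    · -- j = 0: no shrink, every frontier index is eligible
      have hpl : pre.length = 0 := by omega
      have hkey : ∀ i < xs.length,
          (i < c ↔ ∀ j' < pre.length, xs.getD i 0 + row.getD j' 0 < target) := by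
        intro i hi
        rw [hinv i hi]
        constructor
        · intro hall j' hj'; omega
        · intro hall j' hj'; omega
      rw [pvColLoop_cons_zero target row xs r rs pre.length nxt c hpre]
      have hinv0 : ∀ i < xs.length,
          (i < c ↔ ∀ j' < (pre ++ [r]).length - 1, xs.getD i 0 + row.getD j' 0 < target) := by
        intro i hi
        simpa using hkey i hi
      have hih := ih (pre ++ [r]) hrow' (PySem.Set.update nxt ((xs.take c).map (fun x => x + r))) c hc hinv0 z
      rw [hlen'] at hih
      rw [hih, PySem.Set.mem_update, mem_take_map]
      constructor
      · rintro ((hz | ⟨i, hi, hic, rfl⟩) | ⟨i, hi, j, hjge, hjlen, hzv, hall⟩)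
        · exact Or.inl hz
        · exact Or.inr ⟨i, hi, pre.length, le_refl _, hjlen0, by rw [hj0], (hkey i hi).mp hic⟩
        · exact Or.inr ⟨i, hi, j, by omega, hjlen, hzv, hall⟩
      · rintro (hz | ⟨i, hi, j, hjge, hjlen, hzv, hall⟩)
        · exact Or.inl (Or.inl hz)
        · rcases Nat.eq_or_lt_of_le hjge with rfl | hgt
          · exact Or.inl (Or.inr ⟨i, hi, (hkey i hi).mpr hall, by rw [← hj0]; exact hzv⟩)
          · exact Or.inr ⟨i, hi, j, by omega, hjlen, hzv, hall⟩

theorem exists_index_iff (xs : List Int) (P : Int → Prop) :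
    (∃ i < xs.length, P (xs.getD i 0)) ↔ ∃ x ∈ xs, P x := by
  constructor
  · rintro ⟨i, hi, hp⟩
    exact ⟨xs.getD i 0, by rw [List.getD_eq_getElem _ _ hi]; exact List.getElem_mem hi, hp⟩
  · rintro ⟨x, hx, hp⟩
    obtain ⟨i, hi, rfl⟩ := List.mem_iff_getElem.mp hx
    exact ⟨i, hi, by rw [List.getD_eq_getElem _ _ hi]; exact hp⟩

theorem mem_pvLevel (target : Int) (row : List Int) (frontier : PySem.Set Int) (z : Int) :
    z ∈ pvLevel target row frontier ↔
      pvPair target row (PySem.List.sorted frontier (fun x => x) false) z := by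
  unfold pvLevel pvPair
  set xs := PySem.List.sorted frontier (fun x => x) false with hxs
  have hsorted : xs.Pairwise (· ≤ ·) := PySem.List.sorted_pairwise frontier (fun x => x)
  have h := mem_pvColLoop target row xs hsorted row [] (by simp) PySem.Set.empty xs.length
    (le_refl _) (by intro i hi; simpa using hi) z
  simp only [List.length_nil] at h
  rw [h]
  simp only [PySem.Set.empty, List.not_mem_nil, false_or]
  rw [← exists_index_iff xs (fun x => ∃ j < row.length, z = x + row.getD j 0 ∧
    ∀ j' < j, x + row.getD j' 0 < target)]
  constructor
  · rintro ⟨i, hi, j, _, hjlen, hzv, hall⟩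
    exact ⟨i, hi, j, hjlen, hzv, hall⟩
  · rintro ⟨i, hi, j, hjlen, hzv, hall⟩
    exact ⟨i, hi, j, by omega, hjlen, hzv, hall⟩

-- pvPair only reads the member set of its frontier argument
theorem pvPair_congr (target : Int) (row : List Int) (s t : List Int)
    (h : ∀ w, w ∈ s ↔ w ∈ t) (z : Int) :
    pvPair target row s z ↔ pvPair target row t z := by
  unfold pvPair
  constructor
  · rintro ⟨x, hx, rest⟩; exact ⟨x, (h x).mp hx, rest⟩
  · rintro ⟨x, hx, rest⟩; exact ⟨x, (h x).mpr hx, rest⟩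

theorem levels_mem_eq (target : Int) (rows : List (List Int)) :
    ∀ (stA stB : PySem.Set Int), (∀ w, w ∈ stA ↔ w ∈ stB) →
      ∀ z, z ∈ rows.foldl (fun st row => pvRowStep target row st) stA ↔
            z ∈ rows.foldl (fun fr row => pvLevel target row fr) stB := by
  induction rows with
  | nil => intro stA stB h z; simpa using h z
  | cons row rest ih =>
    intro stA stB h z
    simp only [List.foldl_cons]
    refine ih _ _ ?_ z
    intro w
    rw [mem_pvRowStep, mem_pvLevel]
    refine Iff.trans (pvPair_congr target row stA stB h w) ?_
    exact pvPair_congr target row stB _ (fun u => (PySem.List.mem_sorted _ _ _ _).symm) w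

theorem min_out_eq (target : Int) (l1 l2 : List Int) (h : ∀ z, z ∈ l1 ↔ z ∈ l2) :
    (PySem.List.min? (l1.map (fun x => |x - target|)) (fun v => v)).getD 0 =
      (PySem.List.min? (l2.map (fun x => |x - target|)) (fun v => v)).getD 0 := by
  have hmap : ∀ w, w ∈ l1.map (fun x => |x - target|) ↔ w ∈ l2.map (fun x => |x - target|) := by
    intro w
    simp only [List.mem_map]
    constructor
    · rintro ⟨x, hx, rfl⟩; exact ⟨x, (h x).mp hx, rfl⟩
    · rintro ⟨x, hx, rfl⟩; exact ⟨x, (h x).mpr hx, rfl⟩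
  by_cases h1 : l1 = []
  · have h2 : l2 = [] := by
      rw [List.eq_nil_iff_forall_not_mem]
      intro x hx
      rw [List.eq_nil_iff_forall_not_mem] at h1
      exact h1 x ((h x).mpr hx)
    subst h1; subst h2; rfl
  · have h2 : l2 ≠ [] := by
      intro hn
      subst hn
      exact h1 (List.eq_nil_iff_forall_not_mem.mpr (fun x hx => List.not_mem_nil ((h x).mp hx)))
    obtain ⟨m1, hm1⟩ := Option.ne_none_iff_exists'.mp
      (fun hn => absurd (List.map_eq_nil_iff.mp
        ((PySem.List.min?_eq_none_iff (l1.map (fun x => |x - target|)) (fun v => v)).mp hn)) h1)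
    obtain ⟨m2, hm2⟩ := Option.ne_none_iff_exists'.mp
      (fun hn => absurd (List.map_eq_nil_iff.mp
        ((PySem.List.min?_eq_none_iff (l2.map (fun x => |x - target|)) (fun v => v)).mp hn)) h2)
    rw [hm1, hm2]
    simp only [Option.getD_some]
    have hle1 : m1 ≤ m2 := PySem.List.min?_isMin hm1 m2 ((hmap m2).mpr (PySem.List.min?_mem hm2))
    have hle2 : m2 ≤ m1 := PySem.List.min?_isMin hm2 m1 ((hmap m1).mp (PySem.List.min?_mem hm1))
    omega

-- ===== VERDICT (by name: the statement is the Claim_ definition above) =====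
theorem minimizeTheDifference2_spec : Claim_equal_minimizeTheDifference2 := by
  intro mat target hdom hpre
  unfold Spec_minimizeTheDifference2 minimizeTheDifference2 minimizeTheDifference2_alt
  exact min_out_eq target _ _
    (levels_mem_eq target (mat.map (fun row => PySem.List.sorted row (fun x => x) false))
      (PySem.Set.ofList [0]) (PySem.Set.ofList [0]) (fun _ => Iff.rfl))
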